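-- pv_equiv track=rewrite | github.com/BekkerBarnabasCkik/Python | rekurzió/Mjölnir.py | Becsapodas
-- ===== SOURCE A (Python) =====
-- def Becsapodas(szamok, N, M, Ndb, Mdb, legnagyobb, pozok):
--     if Ndb!=N:
--         if len(pozok)!=0:
--             if szamok[0][Mdb*N+Ndb]>legnagyobb:
--                 legnagyobb=szamok[0][Mdb*N+Ndb]
--                 pozok=[Ndb]
--             elif szamok[0][Mdb*N+Ndb]==legnagyobb:
--                 pozok.append(Ndb)
--         else:
--             pozok.append(Ndb)
--             legnagyobb=szamok[0][Mdb*N+Ndb]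
--         pozok=Becsapodas(szamok, N, M, Ndb+1, Mdb, legnagyobb, pozok)
--
--     return pozok
-- ===== SOURCE B (Python) =====
-- def Becsapodas(szamok, N, M, Ndb, Mdb, legnagyobb, pozok):
--     # iterative scan instead of A's recursion; same append/rebind mutation pattern
--     for i in range(Ndb, N):
--         v = szamok[0][Mdb*N+i]
--         if not pozok:
--             pozok.append(i)
--             legnagyobb = v
--         elif v > legnagyobb:
--             legnagyobb = v
--             pozok = [i]
--         elif v == legnagyobb:
--             pozok.append(i)
--     return pozok
-- ===== Notes on version B (the rewrite author's own statement) =====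
-- stated objective: simpler
-- what changed: Replaces A's tail recursion (one call frame per index, threading the state through parameters) by a single flat for-loop over range(Ndb, N) that maintains legnagyobb/pozok in place.
import Mathlib
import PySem

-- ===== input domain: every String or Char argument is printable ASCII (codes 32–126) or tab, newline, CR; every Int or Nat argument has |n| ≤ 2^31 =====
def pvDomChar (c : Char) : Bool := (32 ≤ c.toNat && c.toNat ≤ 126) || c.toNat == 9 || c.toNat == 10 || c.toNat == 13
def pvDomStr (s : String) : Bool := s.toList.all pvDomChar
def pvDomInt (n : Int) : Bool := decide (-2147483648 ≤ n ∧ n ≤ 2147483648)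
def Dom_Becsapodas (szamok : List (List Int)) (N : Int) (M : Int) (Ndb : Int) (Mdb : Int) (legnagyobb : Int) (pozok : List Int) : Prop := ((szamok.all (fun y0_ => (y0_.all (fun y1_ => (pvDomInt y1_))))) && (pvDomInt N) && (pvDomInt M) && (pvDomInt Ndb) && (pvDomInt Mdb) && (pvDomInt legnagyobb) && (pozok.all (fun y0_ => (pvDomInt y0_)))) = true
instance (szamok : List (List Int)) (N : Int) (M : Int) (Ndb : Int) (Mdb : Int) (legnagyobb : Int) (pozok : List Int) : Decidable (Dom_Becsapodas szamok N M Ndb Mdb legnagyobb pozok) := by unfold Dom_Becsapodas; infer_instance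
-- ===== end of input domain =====

-- B replaces A's tail recursion by a flat loop over range(Ndb, N) (simpler: no call
-- stack, same state updates). A mutates pozok via append on the equal/empty branches;
-- B performs the same mutations, and the equivalence proved here is about the return value.

-- ===== PORT A =====
-- A's recursion, with fuel (N - Ndb).toNat making it total; inside Pre_ (Ndb ≤ N)
-- the fuel runs out exactly when Ndb = N, i.e. at A's 'if Ndb != N' guard.
def BecsA (szamok : List (List Int)) (N : Int) (Mdb : Int) : Nat → Int → Int → List Int → List Int
  | 0, _, _, pozok => pozok
  | f+1, Ndb, legnagyobb, pozok =>
    let v := ((PySem.List.pyGet? szamok 0).bind (fun r => PySem.List.pyGet? r (Mdb*N+Ndb))).getD 0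
    if pozok.length ≠ 0 then
      if v > legnagyobb then
        BecsA szamok N Mdb f (Ndb+1) v [Ndb]
      else if v = legnagyobb then
        BecsA szamok N Mdb f (Ndb+1) legnagyobb (pozok ++ [Ndb])
      else
        BecsA szamok N Mdb f (Ndb+1) legnagyobb pozok
    else
      BecsA szamok N Mdb f (Ndb+1) v (pozok ++ [Ndb])

def Becsapodas (szamok : List (List Int)) (N : Int) (M : Int) (Ndb : Int) (Mdb : Int) (legnagyobb : Int) (pozok : List Int) : List Int :=
  BecsA szamok N Mdb (N - Ndb).toNat Ndb legnagyobb pozok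

-- ===== PORT B =====
-- one loop iteration of Source B's for-loop
def becsStep (szamok : List (List Int)) (N : Int) (Mdb : Int) (st : Int × List Int) (i : Int) : Int × List Int :=
  let v := ((PySem.List.pyGet? szamok 0).bind (fun r => PySem.List.pyGet? r (Mdb*N+i))).getD 0
  if st.2.isEmpty then (v, st.2 ++ [i])
  else if v > st.1 then (v, [i])
  else if v = st.1 then (st.1, st.2 ++ [i])
  else st

def Becsapodas_alt (szamok : List (List Int)) (N : Int) (M : Int) (Ndb : Int) (Mdb : Int) (legnagyobb : Int) (pozok : List Int) : List Int :=
  ((PySem.List.pyRange Ndb N 1).foldl (becsStep szamok N Mdb) (legnagyobb, pozok)).2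

-- ===== PRECONDITION & SPEC =====
-- Pre_ excludes the inputs on which Python A raises: Ndb > N (unbounded recursion,
-- RecursionError/IndexError) and any visited index szamok[0][Mdb*N+i] that is out of
-- range or with szamok empty (IndexError).
-- the visited indices Mdb*N+i, Ndb ≤ i < N, form one contiguous interval, so validity
-- (with Python's negative-index wraparound) is two endpoint bounds on szamok[0]'s length
def Pre_Becsapodas (szamok : List (List Int)) (N : Int) (M : Int) (Ndb : Int) (Mdb : Int) (legnagyobb : Int) (pozok : List Int) : Prop :=
  Ndb ≤ N ∧ (Ndb < N → szamok ≠ [] ∧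
    -((szamok.headD []).length : Int) ≤ Mdb*N+Ndb ∧ Mdb*N+N-1 < ((szamok.headD []).length : Int))
instance (szamok : List (List Int)) (N : Int) (M : Int) (Ndb : Int) (Mdb : Int) (legnagyobb : Int) (pozok : List Int) : Decidable (Pre_Becsapodas szamok N M Ndb Mdb legnagyobb pozok) := by unfold Pre_Becsapodas; infer_instance
def pvWitness_Becsapodas : List (List Int) × Int × Int × Int × Int × Int × List Int := ([[5, 2]], 2, 1, 0, 0, 0, [])


def Spec_Becsapodas (szamok : List (List Int)) (N : Int) (M : Int) (Ndb : Int) (Mdb : Int) (legnagyobb : Int) (pozok : List Int) (out : List Int) : Prop := out = Becsapodas_alt szamok N M Ndb Mdb legnagyobb pozok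
instance (szamok : List (List Int)) (N : Int) (M : Int) (Ndb : Int) (Mdb : Int) (legnagyobb : Int) (pozok : List Int) (out : List Int) : Decidable (Spec_Becsapodas szamok N M Ndb Mdb legnagyobb pozok out) := by unfold Spec_Becsapodas; infer_instance

-- ===== CLAIM (what is proved, stated in full; the proofs are below) =====
def Claim_equal_Becsapodas : Prop := ∀ (szamok : List (List Int)) (N : Int) (M : Int) (Ndb : Int) (Mdb : Int) (legnagyobb : Int) (pozok : List Int), Dom_Becsapodas szamok N M Ndb Mdb legnagyobb pozok → Pre_Becsapodas szamok N M Ndb Mdb legnagyobb pozok → Spec_Becsapodas szamok N M Ndb Mdb legnagyobb pozok (Becsapodas szamok N M Ndb Mdb legnagyobb pozok)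

-- ===== LEMMAS AND PROOFS =====

-- the recursion with adequate fuel equals the fold over the remaining indices
theorem becsA_eq_foldl (szamok : List (List Int)) (N Mdb : Int) :
    ∀ (f : Nat) (Ndb legnagyobb : Int) (pozok : List Int), (N - Ndb).toNat = f →
      BecsA szamok N Mdb f Ndb legnagyobb pozok
        = ((PySem.List.pyRange Ndb N 1).foldl (becsStep szamok N Mdb) (legnagyobb, pozok)).2 := by
  intro f
  induction f with
  | zero =>
    intro Ndb lg pz hf
    have h : N ≤ Ndb := by omega
    rw [PySem.List.pyRange_one_eq_nil h]
    simp [BecsA]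
  | succ f ih =>
    intro Ndb lg pz hf
    have h : Ndb < N := by omega
    rw [PySem.List.pyRange_one_cons h]
    simp only [List.foldl_cons]
    have hf' : (N - (Ndb + 1)).toNat = f := by omega
    show BecsA szamok N Mdb (f+1) Ndb lg pz = _
    rw [BecsA]
    simp only [becsStep]
    by_cases hpz : pz = []
    · subst hpz
      simp only [List.length_nil, ne_eq, not_true_eq_false, if_false, List.isEmpty_nil,
        if_true, List.nil_append]
      exact ih (Ndb+1) _ _ hf'
    · have hlen : pz.length ≠ 0 := by simpa using hpz
      have hne : pz.isEmpty = false := by simpa [List.isEmpty_iff] using hpz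
      simp only [hlen, hne, ne_eq, not_false_eq_true, if_true, Bool.false_eq_true, if_false]
      split_ifs with h1 h2
      · exact ih (Ndb+1) _ _ hf'
      · exact ih (Ndb+1) _ _ hf'
      · exact ih (Ndb+1) _ _ hf'

-- ===== VERDICT (by name: the statement is the Claim_ definition above) =====
theorem Becsapodas_spec : Claim_equal_Becsapodas := by
  intro szamok N M Ndb Mdb lg pz _ hpre
  unfold Spec_Becsapodas Becsapodas Becsapodas_alt
  exact becsA_eq_foldl szamok N Mdb _ Ndb lg pz rfl
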